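-- pv_equiv track=rewrite | github.com/krisshen2021/Cyber_Chat | fastapimode/tabby_fastapi_websocket.py | remove_extra_punctuation
-- ===== SOURCE A (Python) =====
-- def remove_extra_punctuation(text):
--     if text is not None and text != "":
--         end_punctuation = [
--             ".",
--             "!",
--             "?",
--             "…",
--             "*",
--             '"',
--             ">",
--             "。",
--             "！",
--             "？",
--             "”",
--             "`",
--             ")",
--         ]
--         if text[-1] not in end_punctuation:
--             for i in range(len(text) - 1, -1, -1):
--                 if text[i] in end_punctuation:
--                     text = text[: i + 1]
--                     break
--         return text
--     else:
--         return None
-- ===== SOURCE B (Python) =====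
-- def remove_extra_punctuation(text):
--     if text is None or text == "":
--         return None
--     end_punctuation = {
--         ".", "!", "?", "…", "*", '"', ">", "。", "！", "？", "”", "`", ")",
--     }
--     idx = max((i for i, ch in enumerate(text) if ch in end_punctuation), default=-1)
--     return text if idx == -1 else text[: idx + 1]
-- ===== Notes on version B (the rewrite author's own statement) =====
-- stated objective: simpler
-- what changed: Replaces A's backward early-exit index loop plus a separate last-char branch with a single forward pass: the max punctuation index over enumerate(text) (default -1) and one slice, which unifies both of A's branches.
import Mathlib
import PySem

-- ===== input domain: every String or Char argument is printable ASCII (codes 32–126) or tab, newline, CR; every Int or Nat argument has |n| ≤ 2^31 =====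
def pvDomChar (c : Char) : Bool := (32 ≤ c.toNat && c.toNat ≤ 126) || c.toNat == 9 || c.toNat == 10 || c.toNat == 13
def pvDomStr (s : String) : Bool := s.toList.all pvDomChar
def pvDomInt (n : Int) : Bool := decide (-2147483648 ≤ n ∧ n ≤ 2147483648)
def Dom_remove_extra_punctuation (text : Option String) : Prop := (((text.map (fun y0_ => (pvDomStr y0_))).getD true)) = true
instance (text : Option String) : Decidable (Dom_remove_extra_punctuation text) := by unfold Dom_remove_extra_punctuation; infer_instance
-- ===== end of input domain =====

-- B replaces A's backward early-exit loop plus separate last-char branch by one forward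
-- enumerate pass taking the max punctuation index, then a single slice (objective: simpler).

-- ===== PORT A =====
-- A's punctuation list (a Python list, membership tested with 'in')
def pvPunctA : List Char := ['.', '!', '?', '…', '*', '"', '>', '。', '！', '？', '”', '`', ')']

-- the backward loop 'for i in range(len(text)-1, -1, -1): …  break'; fuel = i+1, so
-- 'pvLoopA l (i+1)' checks index i first, exactly as the Python loop does
def pvLoopA (l : List Char) : Nat → List Char
  | 0 => l
  | i + 1 => if pvPunctA.contains (l.getD i ' ') then l.take (i + 1) else pvLoopA l i

def remove_extra_punctuation (text : Option String) : Option String :=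
  match text with
  | none => none
  | some s =>
    if s = "" then none
    else
      let l := s.toList
      -- 'if text[-1] not in end_punctuation:' (index -1 of a nonempty string)
      if ¬ pvPunctA.contains ((PySem.List.pyGet? l (-1)).getD ' ') then
        some (String.ofList (pvLoopA l l.length))
      else some s

-- ===== PORT B =====
-- B's punctuation set (a Python set literal, used only for membership)
def pvPunctB : PySem.Set Char :=
  PySem.Set.ofList ['.', '!', '?', '…', '*', '"', '>', '。', '！', '？', '”', '`', ')']

def remove_extra_punctuation_alt (text : Option String) : Option String :=
  match text with
  | none => none
  | some s =>
    if s = "" then none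
    else
      let l := s.toList
      -- idx = max((i for i, ch in enumerate(text) if ch in end_punctuation), default=-1)
      let idx : Int :=
        (((PySem.List.enumerate l 0).filter (fun p => PySem.Set.contains pvPunctB p.2)).map
          (fun p => p.1)).foldl max (-1)
      if idx = -1 then some s else some (String.ofList (l.take (idx.toNat + 1)))

-- ===== PRECONDITION & SPEC =====
def Spec_remove_extra_punctuation (text : Option String) (out : Option String) : Prop := out = remove_extra_punctuation_alt text
instance (text : Option String) (out : Option String) : Decidable (Spec_remove_extra_punctuation text out) := by unfold Spec_remove_extra_punctuation; infer_instance

-- ===== CLAIM (what is proved, stated in full; the proofs are below) =====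
def Claim_equal_remove_extra_punctuation : Prop := ∀ (text : Option String), Dom_remove_extra_punctuation text → Spec_remove_extra_punctuation text (remove_extra_punctuation text)

-- ===== LEMMAS AND PROOFS =====

-- the two membership tests agree (the set literal has no duplicates)
theorem pvPunctB_eq : pvPunctB = pvPunctA := by decide

-- M l i : the greatest index j < i with l[j] a punctuation char, as an Int (-1 if none)
def pvM (l : List Char) : Nat → Int
  | 0 => -1
  | i + 1 => if pvPunctA.contains (l.getD i ' ') then (i : Int) else pvM l i

theorem pvM_lt (l : List Char) (i : Nat) : pvM l i < (i : Int) := by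
  induction i with
  | zero => simp [pvM]
  | succ i ih =>
    simp only [pvM]
    split
    · push_cast; omega
    · have := ih; push_cast at *; omega

-- A's loop computes the same truncation as the max index
theorem pvLoopA_eq (l : List Char) (i : Nat) :
    pvLoopA l i = if pvM l i = -1 then l else l.take ((pvM l i).toNat + 1) := by
  induction i with
  | zero => simp [pvLoopA, pvM]
  | succ i ih =>
    simp only [pvLoopA, pvM]
    split
    · simp
    · exact ih

-- pvM only looks at the first i entries
theorem pvM_append (l : List Char) (c : Char) (i : Nat) (h : i ≤ l.length) :
    pvM (l ++ [c]) i = pvM l i := by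
  induction i with
  | zero => rfl
  | succ i ih =>
    have hi : i < l.length := by omega
    simp only [pvM, List.getD_append _ _ _ _ hi]
    rw [ih (by omega)]

-- (l ++ [c])[l.length] as getD
theorem pvGetD_concat (l : List Char) (c : Char) : (l ++ [c]).getD l.length ' ' = c := by
  simp [List.getD_eq_getElem?_getD]

-- B's fold over the filtered enumeration computes pvM at the full length
theorem pvIdx_eq (l : List Char) :
    (((PySem.List.enumerate l 0).filter (fun p => pvPunctA.contains p.2)).map
      (fun p => p.1)).foldl max (-1) = pvM l l.length := by
  induction l using List.reverseRecOn with
  | nil => rfl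
  | append_singleton l c ih =>
    rw [PySem.List.enumerate_append]
    simp only [List.filter_append, List.map_append, List.foldl_append, ih]
    have hlen : (l ++ [c]).length = l.length + 1 := by simp
    have hM1 : pvM (l ++ [c]) (l.length + 1)
        = if pvPunctA.contains c then (l.length : Int) else pvM (l ++ [c]) l.length := by
      simp only [pvM, pvGetD_concat]
    by_cases hc : pvPunctA.contains c
    · simp only [PySem.List.enumerate, List.filter_cons, List.filter_nil, hc, if_true,
        List.map_cons, List.map_nil, List.foldl_cons, List.foldl_nil]
      rw [hlen, hM1, if_pos hc]
      have := pvM_lt l l.length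
      omega
    · simp only [PySem.List.enumerate, List.filter_cons, List.filter_nil, hc,
        Bool.false_eq_true, if_false, List.map_nil, List.foldl_nil]
      rw [hlen, hM1, if_neg hc, pvM_append l c l.length le_rfl]

-- the last character, as A reads it, is l.getD (l.length - 1) ' '
theorem pvLast_eq (l : List Char) :
    (PySem.List.pyGet? l (-1)).getD ' ' = l.getD (l.length - 1) ' ' := by
  rw [PySem.List.pyGet?_neg_one, List.getLast?_eq_getElem?, List.getD_eq_getElem?_getD]

-- ===== VERDICT (by name: the statement is the Claim_ definition above) =====
theorem remove_extra_punctuation_spec : Claim_equal_remove_extra_punctuation := by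
  unfold Claim_equal_remove_extra_punctuation
  intro text _
  unfold Spec_remove_extra_punctuation remove_extra_punctuation remove_extra_punctuation_alt
  match text with
  | none => rfl
  | some s =>
    by_cases hs : s = ""
    · simp [hs]
    · simp only [hs, if_false]
      have hl : s.toList ≠ [] := by
        intro h; exact hs (String.toList_eq_nil_iff.mp h)
      have hofl : String.ofList s.toList = s := String.ofList_toList
      set l := s.toList with hldef
      have hn : l.length = (l.length - 1) + 1 := by
        have := List.length_pos_of_ne_nil hl; omega
      rw [pvPunctB_eq, pvLast_eq]
      have hcont : (fun p : Int × Char => PySem.Set.contains pvPunctA p.2)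
          = (fun p : Int × Char => pvPunctA.contains p.2) := by
        funext p; simp [PySem.Set.contains]
      rw [hcont, pvIdx_eq]
      by_cases hlast : pvPunctA.contains (l.getD (l.length - 1) ' ')
      · -- last char is punctuation: A returns s unchanged; B takes the whole string
        have hM : pvM l l.length = ((l.length - 1 : Nat) : Int) := by
          rw [hn]; simp only [pvM, hlast, if_true]; omega
        rw [if_neg (by simp only [not_not]; simpa [List.getD_eq_getElem?_getD] using hlast),
          hM, if_neg (by omega)]
        have : (((l.length - 1 : Nat) : Int).toNat + 1) = l.length := by omega
        rw [this]
        simp [hofl]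
      · rw [if_pos (by simpa [List.getD_eq_getElem?_getD] using hlast), pvLoopA_eq]
        by_cases hM : pvM l l.length = -1
        · rw [if_pos hM, if_pos hM, hofl]
        · rw [if_neg hM, if_neg hM]
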